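-- pv_equiv track=rewrite | github.com/lukexingdbmgr/ACE | validate_palindrome_II.py | valid_impl
-- ===== SOURCE A (Python) =====
-- def valid_impl(s, k):
--     t = 0
--     j = len(s) - 1
--     while (t <= j):
--         if t == k or j == k:
--             t += 1
--             j -= 1
--             continue
--         if s[t] != s[j]:
--             return False
--         t += 1
--         j -= 1
--     return True
-- ===== SOURCE B (Python) =====
-- def valid_impl(s, k):
--     n = len(s)
--     seq = [c for i, c in enumerate(s) if i != k and i != n - 1 - k]
--     return seq == seq[::-1]
-- ===== Notes on version B (the rewrite author's own statement) =====
-- stated objective: simpler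
-- what changed: Replaced A's two-pointer while loop with early exit by filtering out indices k and len(s)-1-k once and comparing the remaining character list with its reverse.
import Mathlib
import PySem

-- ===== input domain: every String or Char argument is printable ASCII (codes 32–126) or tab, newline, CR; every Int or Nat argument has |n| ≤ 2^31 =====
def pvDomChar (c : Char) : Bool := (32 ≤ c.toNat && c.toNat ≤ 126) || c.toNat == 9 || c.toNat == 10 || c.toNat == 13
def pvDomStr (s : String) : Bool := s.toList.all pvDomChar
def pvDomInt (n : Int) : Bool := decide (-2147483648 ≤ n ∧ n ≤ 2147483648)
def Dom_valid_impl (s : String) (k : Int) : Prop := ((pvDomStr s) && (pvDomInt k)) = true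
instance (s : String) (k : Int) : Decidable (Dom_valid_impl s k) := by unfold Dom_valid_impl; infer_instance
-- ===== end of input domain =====

-- B replaces A's two-pointer while loop by filtering out indices k and len-1-k and
-- comparing the remaining character list with its reverse (objective: simpler).

-- ===== PORT A =====
-- the while loop of A: two pointers t, j moving inwards.  In every call A makes the
-- indices satisfy 0 ≤ t ≤ j < len, so s[t]/s[j] never raise; pyGet? Option values are
-- compared directly (equal iff the chars are equal there).
def validLoop (cs : List Char) (k t j : Int) : Bool :=
  if h : t ≤ j then
    if t == k || j == k then validLoop cs k (t + 1) (j - 1)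
    else if PySem.List.pyGet? cs t ≠ PySem.List.pyGet? cs j then false
    else validLoop cs k (t + 1) (j - 1)
  else true
termination_by (j - t + 1).toNat
decreasing_by all_goals simp_all; omega

def valid_impl (s : String) (k : Int) : Bool :=
  validLoop s.toList k 0 ((s.toList.length : Int) - 1)

-- ===== PORT B =====
-- Source B: seq = [c for i, c in enumerate(s) if i != k and i != n-1-k]; seq == seq[::-1]
def valid_impl_alt (s : String) (k : Int) : Bool :=
  let cs := s.toList
  let n : Int := cs.length
  let seq := ((PySem.List.enumerate cs).filter
      (fun p => p.1 != k && p.1 != n - 1 - k)).map (·.2)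
  seq == seq.reverse

-- ===== PRECONDITION & SPEC =====
def Spec_valid_impl (s : String) (k : Int) (out : Bool) : Prop := out = valid_impl_alt s k
instance (s : String) (k : Int) (out : Bool) : Decidable (Spec_valid_impl s k out) := by unfold Spec_valid_impl; infer_instance

-- ===== CLAIM (what is proved, stated in full; the proofs are below) =====
def Claim_equal_valid_impl : Prop := ∀ (s : String) (k : Int), Dom_valid_impl s k → Spec_valid_impl s k (valid_impl s k)

-- ===== LEMMAS AND PROOFS =====

-- the common characterisation: every mirrored pair not containing index k (as int) matches
def Good (cs : List Char) (k : Int) : Prop :=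
  ∀ i : Nat, (h : i < cs.length) → (i : Int) ≠ k → ((cs.length : Int) - 1 - (i : Int)) ≠ k →
    cs[i]'h = cs[cs.length - 1 - i]'(by omega)

lemma validLoop_iff (cs : List Char) (k : Int) :
    ∀ (fuel : Nat) (t j : Int), (j - t + 1).toNat ≤ fuel → 0 ≤ t →
    t + j = (cs.length : Int) - 1 →
    (validLoop cs k t j = true ↔
      ∀ i : Nat, t ≤ (i : Int) → 2 * (i : Int) ≤ (cs.length : Int) - 1 →
        (i : Int) ≠ k → ((cs.length : Int) - 1 - (i : Int)) ≠ k →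
        cs[i]? = cs[cs.length - 1 - i]?) := by
  intro fuel
  induction fuel with
  | zero =>
    intro t j hf ht hsum
    rw [validLoop]
    rw [dif_neg (by omega : ¬ t ≤ j)]
    simp only [true_iff]
    intro i h1 h2 h3 h4
    exfalso; omega
  | succ f ih =>
    intro t j hf ht hsum
    rw [validLoop]
    by_cases hle : t ≤ j
    · rw [dif_pos hle]
      by_cases hsk : (t == k || j == k) = true
      · rw [if_pos hsk]
        rw [ih (t + 1) (j - 1) (by omega) (by omega) (by omega)]
        simp only [beq_iff_eq, Bool.or_eq_true] at hsk
        constructor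
        · intro H i h1 h2 h3 h4
          by_cases hit : (i : Int) = t
          · exfalso; omega
          · exact H i (by omega) h2 h3 h4
        · intro H i h1 h2 h3 h4
          exact H i (by omega) h2 h3 h4
      · simp only [beq_iff_eq, Bool.or_eq_true, not_or] at hsk
        rw [if_neg (by simp only [beq_iff_eq, Bool.or_eq_true, not_or]; exact hsk)]
        rw [PySem.List.pyGet?_of_nonneg cs (show (0:Int) ≤ t by omega),
            PySem.List.pyGet?_of_nonneg cs (show (0:Int) ≤ j by omega)]
        by_cases hch : cs[t.toNat]? = cs[j.toNat]?
        · rw [if_neg (by simpa using hch)]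
          rw [ih (t + 1) (j - 1) (by omega) (by omega) (by omega)]
          constructor
          · intro H i h1 h2 h3 h4
            by_cases hit : (i : Int) = t
            · have e1 : t.toNat = i := by omega
              have e2 : j.toNat = cs.length - 1 - i := by omega
              rw [e1, e2] at hch
              exact hch
            · exact H i (by omega) h2 h3 h4
          · intro H i h1 h2 h3 h4
            exact H i (by omega) h2 h3 h4
        · rw [if_pos (by simpa using hch)]
          simp only [Bool.false_eq_true, false_iff]
          intro H
          apply hch
          have := H t.toNat (by omega) (by omega) (by omega) (by omega)
          have e2 : cs.length - 1 - t.toNat = j.toNat := by omega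
          rw [e2] at this
          exact this
    · rw [dif_neg hle]
      simp only [true_iff]
      intro i h1 h2 h3 h4
      exfalso; omega

lemma A_iff (s : String) (k : Int) :
    valid_impl s k = true ↔ Good s.toList k := by
  unfold valid_impl
  rw [validLoop_iff s.toList k s.toList.length 0 ((s.toList.length : Int) - 1)
      (by omega) le_rfl (by omega)]
  constructor
  · intro H i hi h3 h4
    by_cases hhalf : 2 * (i : Int) ≤ (s.toList.length : Int) - 1
    · have h := H i (by omega) hhalf h3 h4
      rw [List.getElem?_eq_getElem hi, List.getElem?_eq_getElem (by omega)] at h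
      exact Option.some_inj.mp h
    · have h := H (s.toList.length - 1 - i) (by omega) (by omega) (by omega) (by omega)
      have e : s.toList.length - 1 - (s.toList.length - 1 - i) = i := by omega
      rw [e] at h
      rw [List.getElem?_eq_getElem (by omega), List.getElem?_eq_getElem hi] at h
      exact (Option.some_inj.mp h).symm
  · intro H i h1 h2 h3 h4
    rw [List.getElem?_eq_getElem (by omega), List.getElem?_eq_getElem (by omega)]
    exact congrArg some (H i (by omega) h3 h4)

lemma pyRange_rev (n : Nat) :
    (PySem.List.pyRange 0 (n : Int)).reverse
      = (PySem.List.pyRange 0 (n : Int)).map (fun j => (n : Int) - 1 - j) := by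
  apply List.ext_getElem
  · simp [PySem.List.length_pyRange_one]
  · intro p h1 h2
    have hlen : (PySem.List.pyRange 0 (n : Int)).length = n := by
      rw [PySem.List.length_pyRange_one]; omega
    rw [List.getElem_reverse, List.getElem_map, PySem.List.getElem_pyRange_one,
      PySem.List.getElem_pyRange_one, hlen]
    have hp : p < n := by rw [List.length_reverse, hlen] at h1; exact h1
    omega

lemma B_core (cs : List Char) (k : Int) :
    ((((PySem.List.enumerate cs).filter
        (fun p => p.1 != k && p.1 != (cs.length : Int) - 1 - k)).map (·.2)) ==
     (((PySem.List.enumerate cs).filter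
        (fun p => p.1 != k && p.1 != (cs.length : Int) - 1 - k)).map (·.2)).reverse) = true
    ↔ Good cs k := by
  rw [beq_iff_eq]
  rw [PySem.List.enumerate_eq_map_pyRange cs ' ', List.filter_map, List.map_map]
  simp only [Function.comp_def]
  have hlen : PySem.List.len cs = (cs.length : Int) := by simp [PySem.List.len]
  rw [hlen]
  set Q : Int → Bool := fun j => j != k && j != (cs.length : Int) - 1 - k with hQ
  set g : Int → Char := fun j => PySem.List.pyGetD cs j ' ' with hg
  set I : List Int := (PySem.List.pyRange 0 (cs.length : Int)).filter Q with hIdef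
  have hI : I.reverse = I.map (fun j => (cs.length : Int) - 1 - j) := by
    rw [hIdef, ← List.filter_reverse, pyRange_rev, List.filter_map]
    congr 1
    apply List.filter_congr
    intro x _
    show Q ((cs.length : Int) - 1 - x) = Q x
    rw [hQ]
    rw [Bool.eq_iff_iff]
    simp only [Bool.and_eq_true, bne_iff_ne]
    constructor <;> (rintro ⟨a, b⟩; exact ⟨by omega, by omega⟩)
  have hrev : (I.map g).reverse = I.map (fun j => g ((cs.length : Int) - 1 - j)) := by
    rw [← List.map_reverse, hI, List.map_map]
    simp only [Function.comp_def]
  rw [hrev, List.map_eq_map_iff]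
  constructor
  · intro H i hi h3 h4
    have hmem : (i : Int) ∈ I := by
      rw [hIdef, List.mem_filter]
      refine ⟨PySem.List.mem_pyRange_one.mpr ⟨by omega, by omega⟩, ?_⟩
      simp only [hQ, Bool.and_eq_true, bne_iff_ne]
      exact ⟨h3, by omega⟩
    have h := H _ hmem
    simp only [hg] at h
    rw [PySem.List.pyGetD_eq_getElem cs ' ' (by omega) (by omega),
        PySem.List.pyGetD_eq_getElem cs ' ' (by omega) (by omega)] at h
    have e1 : ((i : Int)).toNat = i := by omega
    have e2 : ((cs.length : Int) - 1 - (i : Int)).toNat = cs.length - 1 - i := by omega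
    simp only [e1, e2] at h
    exact h
  · intro H j hj
    rw [hIdef, List.mem_filter, PySem.List.mem_pyRange_one] at hj
    obtain ⟨⟨hj0, hjn⟩, hQj⟩ := hj
    simp only [hQ, Bool.and_eq_true, bne_iff_ne] at hQj
    have hG := H j.toNat (by omega) (by omega) (by omega)
    simp only [hg]
    rw [PySem.List.pyGetD_eq_getElem cs ' ' (by omega) (by omega),
        PySem.List.pyGetD_eq_getElem cs ' ' (by omega) (by omega)]
    have e2 : ((cs.length : Int) - 1 - j).toNat = cs.length - 1 - j.toNat := by omega
    simp only [e2]
    exact hG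

lemma B_iff (s : String) (k : Int) :
    valid_impl_alt s k = true ↔ Good s.toList k :=
  B_core s.toList k

-- ===== VERDICT (by name: the statement is the Claim_ definition above) =====
theorem valid_impl_spec : Claim_equal_valid_impl := by
  intro s k _
  unfold Spec_valid_impl
  have hA := A_iff s k
  have hB := B_iff s k
  cases hAv : valid_impl s k <;> cases hBv : valid_impl_alt s k <;> simp_all
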